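-- pv_equiv track=rewrite | github.com/vintagevikas090/Programming_InterviewBit | Strings/amazing_substring.py | solve
-- ===== SOURCE A (Python) =====
-- def solve(string):
--     n = len(string)
--     if n == 0:
--         return 0
--
--     vowel = 'aeiouAEIOU'
--     tcount = 0
--
--     for i in range(n):
--         if string[i] in vowel:
--           # all the chars after the current vowel will contribute
--             tcount = (tcount + n - i) % 10003
--
--     return tcount
-- ===== SOURCE B (Python) =====
-- def solve(string):
--     MOD = 10003
--     vowels = set('aeiouAEIOU')
--     total = 0
--     seen = 0
--     for ch in string:
--         if ch in vowels:
--             seen += 1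
--         total = (total + seen) % MOD
--     return total
-- ===== Notes on version B (the rewrite author's own statement) =====
-- stated objective: alternative
-- what changed: B sweeps the string once carrying a running count of vowels seen so far and adds that count to the total at every position (prefix-count identity: sum over vowels of n-i equals sum over positions of vowels-so-far), instead of adding n-i at each vowel position as A does.
import Mathlib
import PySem

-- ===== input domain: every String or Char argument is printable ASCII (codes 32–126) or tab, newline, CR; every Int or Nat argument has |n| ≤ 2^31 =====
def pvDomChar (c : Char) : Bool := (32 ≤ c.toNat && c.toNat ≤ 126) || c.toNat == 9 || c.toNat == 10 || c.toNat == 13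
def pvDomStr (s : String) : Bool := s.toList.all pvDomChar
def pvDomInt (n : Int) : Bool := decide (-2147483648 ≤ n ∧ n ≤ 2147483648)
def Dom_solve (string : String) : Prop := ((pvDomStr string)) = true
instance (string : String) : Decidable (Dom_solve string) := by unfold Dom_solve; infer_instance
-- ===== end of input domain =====

-- B makes a single left-to-right sweep adding a running vowel count at every position,
-- instead of A's per-vowel contribution n - i; same O(n) cost, different accumulated quantity.

-- ===== PORT A =====
def solveVowel : List Char := "aeiouAEIOU".toList

def solve (string : String) : Int :=
  let cs := string.toList
  let n : Int := (cs.length : Int)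
  if n = 0 then 0
  else
    -- string[i] in vowel: string[i] is a single char, so this is char membership (exact)
    (PySem.List.pyRange 0 n 1).foldl
      (fun tcount i =>
        match PySem.List.pyGet? cs i with
        | some c => if c ∈ solveVowel then PySem.Int.mod (tcount + n - i) 10003 else tcount
        | none => tcount)
      0

-- ===== PORT B =====
def altVowel : List Char := "aeiouAEIOU".toList

def solve_alt (string : String) : Int :=
  (string.toList.foldl
    (fun st ch =>
      let seen := if ch ∈ altVowel then st.2 + 1 else st.2
      (PySem.Int.mod (st.1 + seen) 10003, seen))
    ((0 : Int), (0 : Int))).1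

-- ===== PRECONDITION & SPEC =====
def Spec_solve (string : String) (out : Int) : Prop := out = solve_alt string
instance (string : String) (out : Int) : Decidable (Spec_solve string out) := by unfold Spec_solve; infer_instance

-- ===== CLAIM (what is proved, stated in full; the proofs are below) =====
def Claim_equal_solve : Prop := ∀ (string : String), Dom_solve string → Spec_solve string (solve string)

-- ===== LEMMAS AND PROOFS =====

-- A's loop, written as structural recursion on the suffix of characters still to visit
def loopA (n : Int) : List Char → Int → Int → Int
  | [], _, t => t
  | c :: l, j, t => loopA n l (j + 1) (if c ∈ solveVowel then (t + n - j) % 10003 else t)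

-- the (un-modded) quantity A accumulates from suffix l starting at index j
def sumA (n : Int) : List Char → Int → Int
  | [], _ => 0
  | c :: l, j => (if c ∈ solveVowel then n - j else 0) + sumA n l (j + 1)

-- index-free form of A's sum: each vowel contributes (length of its tail) + 1
def tailSum : List Char → Int
  | [] => 0
  | c :: l => (if c ∈ solveVowel then (l.length : Int) + 1 else 0) + tailSum l

-- B's accumulated quantity (un-modded), starting with k vowels already seen
def sumB (k : Int) : List Char → Int
  | [] => 0
  | c :: l =>
    let k' := if c ∈ altVowel then k + 1 else k
    k' + sumB k' l

theorem loopA_mod (l : List Char) : ∀ (n j x : Int),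
    loopA n l j (x % 10003) = (x + sumA n l j) % 10003 := by
  induction l with
  | nil => intro n j x; simp [loopA, sumA]
  | cons c l ih =>
    intro n j x
    by_cases h : c ∈ solveVowel
    · simp only [loopA, sumA, h, if_pos]
      rw [show x % 10003 + n - j = x % 10003 + (n - j) by ring, Int.emod_add_emod, ih]
      ring_nf
    · simp only [loopA, sumA, h, if_neg, not_false_iff,  ih]
      ring_nf

theorem sumA_eq_tailSum (l : List Char) : ∀ (n j : Int),
    n - j = (l.length : Int) → sumA n l j = tailSum l := by
  induction l with
  | nil => intro n j _; simp [sumA, tailSum]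
  | cons c l ih =>
    intro n j h
    simp only [sumA, tailSum, List.length_cons] at *
    rw [ih n (j + 1) (by push_cast at h ⊢; omega)]
    have : n - j = (l.length : Int) + 1 := by push_cast at h ⊢; omega
    rw [this]

theorem sumB_shift (l : List Char) : ∀ (k : Int),
    sumB k l = k * (l.length : Int) + sumB 0 l := by
  induction l with
  | nil => intro k; simp [sumB]
  | cons c l ih =>
    intro k
    by_cases h : c ∈ altVowel
    · simp only [sumB, h, if_pos, List.length_cons]
      rw [ih (k + 1), ih (0 + 1)]
      push_cast; ring
    · simp only [sumB, h, if_neg, not_false_iff,  List.length_cons]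
      rw [ih k]
      push_cast; ring

theorem tailSum_eq_sumB (l : List Char) : tailSum l = sumB 0 l := by
  induction l with
  | nil => rfl
  | cons c l ih =>
    by_cases h : c ∈ solveVowel
    · have h' : c ∈ altVowel := h
      simp only [tailSum, sumB, h, h', if_pos]
      rw [sumB_shift l (0 + 1), ih]; ring_nf
    · have h' : c ∉ altVowel := h
      simp only [tailSum, sumB, h, h', if_neg, not_false_iff]
      rw [ih]

theorem mod_pos_rw (a : Int) : PySem.Int.mod a 10003 = a % 10003 :=
  PySem.Int.mod_eq_emod_of_pos (by norm_num)

-- bridge: A's foldl over pyRange indices with pyGet? is loopA on the suffix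
theorem fold_eq_loopA (suf : List Char) : ∀ (pre : List Char) (t : Int),
    (PySem.List.pyRange ((pre.length : Int)) (((pre ++ suf).length : Nat) : Int) 1).foldl
      (fun tcount i =>
        match PySem.List.pyGet? (pre ++ suf) i with
        | some c => if c ∈ solveVowel then PySem.Int.mod (tcount + (((pre ++ suf).length : Nat) : Int) - i) 10003 else tcount
        | none => tcount)
      t = loopA (((pre ++ suf).length : Nat) : Int) suf ((pre.length : Int)) t := by
  induction suf with
  | nil =>
    intro pre t
    have : PySem.List.pyRange ((pre.length : Int)) (((pre ++ []).length : Nat) : Int) 1 = [] := by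
      simp [pysem]
    rw [this]; rfl
  | cons c l ih =>
    intro pre t
    have hlt : ((pre.length : Int)) < (((pre ++ c :: l).length : Nat) : Int) := by
      push_cast [List.length_append, List.length_cons]; omega
    rw [PySem.List.pyRange_one_cons hlt]
    simp only [List.foldl_cons]
    have hget : PySem.List.pyGet? (pre ++ c :: l) ((pre.length : Int)) = some c := by
      rw [PySem.List.pyGet?_natCast]
      simp
    rw [hget]
    have := ih (pre ++ [c]) (if c ∈ solveVowel then
        PySem.Int.mod (t + (((pre ++ c :: l).length : Nat) : Int) - (pre.length : Int)) 10003 else t)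
    simp only [List.append_assoc, List.singleton_append, List.length_append, List.length_cons,
      List.length_nil] at this ⊢
    push_cast at this ⊢
    rw [this]
    simp only [mod_pos_rw, loopA]

theorem solve_eq (s : String) : solve s = (tailSum s.toList) % 10003 := by
  unfold solve
  by_cases h : s.toList.length = 0
  · rw [List.length_eq_zero_iff] at h
    simp [h, tailSum]
  · simp only []
    rw [if_neg (by exact_mod_cast h)]
    have hb := fold_eq_loopA s.toList [] 0
    simp only [List.nil_append, List.length_nil, Nat.cast_zero] at hb
    rw [hb]
    have hm := loopA_mod s.toList ((s.toList.length : Nat) : Int) 0 0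
    simp only [Int.zero_emod, zero_add] at hm
    rw [hm, sumA_eq_tailSum s.toList _ 0 (by omega)]

theorem altKey (l : List Char) : ∀ (x k : Int),
    l.foldl (fun st ch =>
        ((st.1 + (if ch ∈ altVowel then st.2 + 1 else st.2)) % 10003,
         (if ch ∈ altVowel then st.2 + 1 else st.2))) (x % 10003, k)
      = ((x + sumB k l) % 10003, k + (l.countP (fun c => decide (c ∈ altVowel)) : Int)) := by
  induction l with
  | nil => intro x k; simp [sumB]
  | cons c l ih =>
    intro x k
    by_cases h : c ∈ altVowel
    · simp only [List.foldl_cons, h, if_pos]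
      rw [Int.emod_add_emod, ih (x + (k + 1)) (k + 1)]
      refine Prod.ext ?_ ?_
      · simp only [sumB, h, if_pos]; ring_nf
      · simp only [List.countP_cons, h, decide_true]; push_cast; ring
    · simp only [List.foldl_cons, h, if_neg, not_false_iff]
      rw [Int.emod_add_emod, ih (x + k) k]
      refine Prod.ext ?_ ?_
      · simp only [sumB, h, if_neg, not_false_iff]; ring_nf
      · simp only [List.countP_cons, h, decide_false]; push_cast; ring

theorem solve_alt_eq (s : String) : solve_alt s = (sumB 0 s.toList) % 10003 := by
  unfold solve_alt
  simp only [mod_pos_rw]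
  have hk := altKey s.toList 0 0
  norm_num at hk
  rw [hk]

-- ===== VERDICT (by name: the statement is the Claim_ definition above) =====
theorem solve_spec : Claim_equal_solve := by
  intro s _
  unfold Spec_solve
  rw [solve_eq, solve_alt_eq, tailSum_eq_sumB]
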